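-- pv_equiv track=rewrite | github.com/kitmaier/coding_puzzles | codewars/1_kyu_BECOME_IMMORTAL.py | elder_age
-- ===== SOURCE A (Python) =====
-- def roundDownToPowerOfTwo(n):
-- 	bound = 1
-- 	while bound<=n:
-- 		bound *= 2
-- 	return int(bound/2)
--
-- def triangleWithModulus(n,modulus):
-- 	return (((n%(modulus*2))*(n%(modulus*2)-1))>>1)%modulus
--
-- def multiplyWithModulus(a,b,modulus):
-- 	return ((a%modulus)*(b%modulus))%modulus
--
-- def multiplyWithModulus3(a,b,c,modulus):
-- 	return multiplyWithModulus(multiplyWithModulus(a,b,modulus),c,modulus)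
--
-- def elder_age(rowCount,colCount,waterline,modulus):
-- 	if rowCount>colCount:
-- 		return elder_age(colCount,rowCount,waterline,modulus)
-- 	if rowCount==1:
-- 		return triangleWithModulus(max(0,colCount-waterline),modulus)
-- 	if rowCount==0:
-- 		return 0
-- 	bound = roundDownToPowerOfTwo(colCount)
-- 	if rowCount<=bound:
-- 		upperLeftPart = multiplyWithModulus(triangleWithModulus(max(0,bound-waterline),modulus),rowCount,modulus)
-- 		upperRightPart = multiplyWithModulus3(rowCount,(colCount-bound),max(0,bound-waterline),modulus) + elder_age(rowCount,colCount-bound,max(0,waterline-bound),modulus)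
-- 		return (upperLeftPart + upperRightPart)%modulus
-- 	else:
-- 		upperLeftPart = multiplyWithModulus(triangleWithModulus(max(0,bound-waterline),modulus),bound,modulus)
-- 		upperRightPart = multiplyWithModulus3(bound,(colCount-bound),max(0,bound-waterline),modulus) + elder_age(bound,colCount-bound,max(0,waterline-bound),modulus)
-- 		lowerLeftPart = multiplyWithModulus3(bound,(rowCount-bound),max(0,bound-waterline),modulus) + elder_age(rowCount-bound,bound,max(0,waterline-bound),modulus)
-- 		lowerRightPart = elder_age(rowCount-bound,colCount-bound,waterline,modulus)
-- 		return (upperLeftPart + upperRightPart + lowerLeftPart + lowerRightPart)%modulus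
-- ===== SOURCE B (Python) =====
-- def elder_age(rowCount, colCount, waterline, modulus):
--     m, n, l = rowCount, colCount, waterline
--     # depth: smallest D with m>>D == n>>D == l>>D == 0
--     D = 0
--     while (m >> D) > 0 or (n >> D) > 0 or (l >> D) > 0:
--         D += 1
--     # tab[da*4+db*2+dc] = (count, sum) for the rectangle (m>>d)+da by (n>>d)+db
--     # above waterline (l>>d)-1+dc; at depth D the rectangle is at most a single cell
--     tab = []
--     for k in range(8):
--         da, db, dc = k >> 2, (k >> 1) & 1, k & 1
--         a = (m >> D) + da
--         b = (n >> D) + db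
--         c = (l >> D) - 1 + dc
--         if a > 0 and b > 0 and c < 0:
--             tab.append((1, -c))
--         else:
--             tab.append((0, 0))
--     d = D
--     while d > 0:
--         d -= 1
--         ma, na, la = m >> d, n >> d, l >> d
--         mb, nb, lb = m >> (d + 1), n >> (d + 1), l >> (d + 1)
--         newtab = []
--         for k in range(8):
--             da, db, dc = k >> 2, (k >> 1) & 1, k & 1
--             a = ma + da
--             b = na + db
--             c = la - 1 + dc
--             gtot = 0
--             ftot = 0
--             for i in range(2):
--                 ai = (a - (a >> 1)) if i == 0 else (a >> 1)
--                 for j in range(2):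
--                     bj = (b - (b >> 1)) if j == 0 else (b >> 1)
--                     cc = (c - (i ^ j)) >> 1
--                     r = (c - (i ^ j)) - 2 * cc
--                     g, f = tab[(ai - mb) * 4 + (bj - nb) * 2 + (cc - lb + 1)]
--                     gtot += g
--                     ftot += 2 * f - r * g
--             newtab.append((gtot, ftot))
--         tab = newtab
--     return tab[1][1] % modulus
-- ===== Notes on version B (the rewrite author's own statement) =====
-- stated objective: alternative
-- what changed: A recursively splits the grid at the largest power of two below the width, subtracting the block height from the waterline; B instead runs an iterative bottom-up bit DP: one pass over bit levels maintaining an 8-entry table of (count, sum-above-waterline) for the floor/ceil halvings of rows, cols and waterline, built from a low-bit parity recurrence.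
-- outside the precondition, e.g. on elder_age(2, 3, -2, 10): A returns 1, B returns 9; on elder_age(-5, 10, 2, 7): A raises RecursionError, B returns 0
import Mathlib
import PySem

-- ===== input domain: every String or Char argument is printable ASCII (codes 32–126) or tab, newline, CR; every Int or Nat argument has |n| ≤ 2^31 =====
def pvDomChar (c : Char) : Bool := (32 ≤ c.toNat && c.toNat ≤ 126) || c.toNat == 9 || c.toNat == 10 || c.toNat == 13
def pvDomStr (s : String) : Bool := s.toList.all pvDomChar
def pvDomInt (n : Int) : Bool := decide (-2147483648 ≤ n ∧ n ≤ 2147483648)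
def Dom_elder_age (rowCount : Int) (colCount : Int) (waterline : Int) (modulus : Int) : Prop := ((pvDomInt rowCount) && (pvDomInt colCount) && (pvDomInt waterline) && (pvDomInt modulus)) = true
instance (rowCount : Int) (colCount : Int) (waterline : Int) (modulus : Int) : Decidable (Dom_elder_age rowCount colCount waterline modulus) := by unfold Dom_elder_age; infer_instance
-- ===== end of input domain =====

-- B replaces A's recursive power-of-two rectangle decomposition by an iterative bottom-up
-- bit-level DP (an 8-entry table of (count, sum-above-waterline) per bit level); the theorems
-- below prove equal return values on the stated Pre_ (nonnegative sizes/waterline, modulus > 0).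

-- ===== PORT A =====

-- roundDownToPowerOfTwo: 'while bound<=n: bound*=2; return int(bound/2)'.  The loop is ported
-- with fuel (n.natAbs+2 iterations always suffice since bound doubles from 1); 'int(bound/2)'
-- is exact integer halving for the reachable bounds (powers of two), ported as bound / 2.
def pvRdpLoop : Nat → Int → Int → Int
  | 0, _, bound => bound / 2
  | f + 1, n, bound => if bound ≤ n then pvRdpLoop f n (bound * 2) else bound / 2

def roundDownToPowerOfTwo (n : Int) : Int := pvRdpLoop (n.natAbs + 2) n 1

-- '>>1' on a Python int is ported as Lean's '>>> 1' (floor shift, exact also on negatives)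
def triangleWithModulus (n : Int) (modulus : Int) : Int :=
  PySem.Int.mod ((PySem.Int.mod n (modulus * 2) * (PySem.Int.mod n (modulus * 2) - 1)) >>> (1 : Nat)) modulus

def multiplyWithModulus (a b modulus : Int) : Int :=
  PySem.Int.mod (PySem.Int.mod a modulus * PySem.Int.mod b modulus) modulus

def multiplyWithModulus3 (a b c modulus : Int) : Int :=
  multiplyWithModulus (multiplyWithModulus a b modulus) c modulus

-- elder_age, ported with fuel: Python's recursion diverges for some negative sizes (outside
-- Pre_); on Pre_ the fuel chosen below strictly exceeds the recursion depth (lemma pvElderFuel_spec).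
def pvElderFuel : Nat → Int → Int → Int → Int → Int
  | 0, _, _, _, _ => 0
  | f + 1, rowCount, colCount, waterline, modulus =>
    if rowCount > colCount then pvElderFuel f colCount rowCount waterline modulus
    else if rowCount = 1 then triangleWithModulus (max 0 (colCount - waterline)) modulus
    else if rowCount = 0 then 0
    else
      let bound := roundDownToPowerOfTwo colCount
      if rowCount ≤ bound then
        let upperLeftPart := multiplyWithModulus (triangleWithModulus (max 0 (bound - waterline)) modulus) rowCount modulus
        let upperRightPart := multiplyWithModulus3 rowCount (colCount - bound) (max 0 (bound - waterline)) modulus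
          + pvElderFuel f rowCount (colCount - bound) (max 0 (waterline - bound)) modulus
        PySem.Int.mod (upperLeftPart + upperRightPart) modulus
      else
        let upperLeftPart := multiplyWithModulus (triangleWithModulus (max 0 (bound - waterline)) modulus) bound modulus
        let upperRightPart := multiplyWithModulus3 bound (colCount - bound) (max 0 (bound - waterline)) modulus
          + pvElderFuel f bound (colCount - bound) (max 0 (waterline - bound)) modulus
        let lowerLeftPart := multiplyWithModulus3 bound (rowCount - bound) (max 0 (bound - waterline)) modulus
          + pvElderFuel f (rowCount - bound) bound (max 0 (waterline - bound)) modulus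
        let lowerRightPart := pvElderFuel f (rowCount - bound) (colCount - bound) waterline modulus
        PySem.Int.mod (upperLeftPart + upperRightPart + lowerLeftPart + lowerRightPart) modulus

def elder_age (rowCount : Int) (colCount : Int) (waterline : Int) (modulus : Int) : Int :=
  pvElderFuel (2 * (rowCount.natAbs + colCount.natAbs) + 2) rowCount colCount waterline modulus

-- ===== PORT B =====

-- 'while (m>>D)>0 or (n>>D)>0 or (l>>D)>0: D += 1', ported with fuel 40: within Dom
-- (|args| ≤ 2^31) the loop runs at most 33 times; D stays ≥ 0, so 'm >> D' is 'm >>> D.toNat'.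
def pvDepthLoop : Nat → Int → Int → Int → Int → Int
  | 0, _, _, _, D => D
  | f + 1, m, n, l, D =>
    if m >>> D.toNat > 0 ∨ n >>> D.toNat > 0 ∨ l >>> D.toNat > 0 then
      pvDepthLoop f m n l (D + 1)
    else D

-- the body of 'for k in range(8)' building the base table at depth D
def pvBaseEntry (m n l : Int) (D : Int) (k : Int) : Int × Int :=
  let da := k >>> (2 : Nat)
  let db := PySem.Int.band (k >>> (1 : Nat)) 1
  let dc := PySem.Int.band k 1
  let a := (m >>> D.toNat) + da
  let b := (n >>> D.toNat) + db
  let c := ((l >>> D.toNat) - 1) + dc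
  if a > 0 ∧ b > 0 ∧ c < 0 then (1, -c) else (0, 0)

-- the body of 'for k in range(8)' building newtab at level d (tab is the level-(d+1) table)
def pvStepEntry (m n l : Int) (d : Int) (tab : List (Int × Int)) (k : Int) : Int × Int :=
  let da := k >>> (2 : Nat)
  let db := PySem.Int.band (k >>> (1 : Nat)) 1
  let dc := PySem.Int.band k 1
  let a := (m >>> d.toNat) + da
  let b := (n >>> d.toNat) + db
  let c := ((l >>> d.toNat) - 1) + dc
  let mb := m >>> (d.toNat + 1)
  let nb := n >>> (d.toNat + 1)
  let lb := l >>> (d.toNat + 1)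
  (PySem.List.pyRange 0 2 1).foldl (fun acc i =>
    let ai := if i = 0 then a - (a >>> (1 : Nat)) else a >>> (1 : Nat)
    (PySem.List.pyRange 0 2 1).foldl (fun acc j =>
      let bj := if j = 0 then b - (b >>> (1 : Nat)) else b >>> (1 : Nat)
      let cc := (c - PySem.Int.bxor i j) >>> (1 : Nat)
      let r := (c - PySem.Int.bxor i j) - 2 * cc
      let gf := PySem.List.pyGetD tab ((ai - mb) * 4 + (bj - nb) * 2 + ((cc - lb) + 1)) (0, 0)
      (acc.1 + gf.1, acc.2 + (2 * gf.2 - r * gf.1))) acc) (0, 0)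

-- 'while d > 0: d -= 1; … tab = newtab'
def pvLoopB (m n l : Int) (tab : List (Int × Int)) (d : Int) : List (Int × Int) :=
  if h : d > 0 then
    let d' := d - 1
    pvLoopB m n l ((PySem.List.pyRange 0 8 1).map (pvStepEntry m n l d' tab)) d'
  else tab
termination_by d.toNat
decreasing_by omega

def elder_age_alt (rowCount : Int) (colCount : Int) (waterline : Int) (modulus : Int) : Int :=
  let D := pvDepthLoop 40 rowCount colCount waterline 0
  let tab := (PySem.List.pyRange 0 8 1).map (pvBaseEntry rowCount colCount waterline D)
  let final := pvLoopB rowCount colCount waterline tab D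
  PySem.Int.mod (PySem.List.pyGetD final 1 (0, 0)).2 modulus



-- ===== PRECONDITION & SPEC =====

-- Pre_ restricts to the kata's natural domain (nonnegative sizes and waterline, a nonzero
-- modulus): outside it A raises (ZeroDivisionError at modulus = 0, RecursionError for negative
-- sizes) or — for a negative waterline — the input lies outside the task's domain and B does
-- not reproduce A's clamping behaviour there (see the cited examples in the claim).
def Pre_elder_age (rowCount : Int) (colCount : Int) (waterline : Int) (modulus : Int) : Prop :=
  0 ≤ rowCount ∧ 0 ≤ colCount ∧ 0 ≤ waterline ∧ modulus ≠ 0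

instance (rowCount : Int) (colCount : Int) (waterline : Int) (modulus : Int) : Decidable (Pre_elder_age rowCount colCount waterline modulus) := by unfold Pre_elder_age; infer_instance

def pvWitness_elder_age : Int × Int × Int × Int := (5, 7, 3, 11)

def Spec_elder_age (rowCount : Int) (colCount : Int) (waterline : Int) (modulus : Int) (out : Int) : Prop := out = elder_age_alt rowCount colCount waterline modulus
instance (rowCount : Int) (colCount : Int) (waterline : Int) (modulus : Int) (out : Int) : Decidable (Spec_elder_age rowCount colCount waterline modulus out) := by unfold Spec_elder_age; infer_instance

-- ===== CLAIM (what is proved, stated in full; the proofs are below) =====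
def Claim_equal_elder_age : Prop := ∀ (rowCount : Int) (colCount : Int) (waterline : Int) (modulus : Int), Dom_elder_age rowCount colCount waterline modulus → Pre_elder_age rowCount colCount waterline modulus → Spec_elder_age rowCount colCount waterline modulus (elder_age rowCount colCount waterline modulus)

-- ===== LEMMAS AND PROOFS =====

def Tz (t : Int) : Int := t * (t - 1) / 2

theorem pvTz_double (t : Int) : 2 * Tz t = t * (t - 1) := by
  have h : Even (t * (t - 1)) := by
    rw [mul_comm]
    simpa using Int.even_mul_succ_self (t - 1)
  unfold Tz
  obtain ⟨c, hc⟩ := h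
  omega

theorem pvXorBit (a b i j : ℕ) (hi : i < 2) (hj : j < 2) :
    (2 * a + i) ^^^ (2 * b + j) = 2 * (a ^^^ b) + (i ^^^ j) := by
  interval_cases i <;> interval_cases j
  · simpa [Nat.bit, Bool.toNat] using Nat.xor_bit false a false b
  · simpa [Nat.bit, Bool.toNat] using Nat.xor_bit false a true b
  · simpa [Nat.bit, Bool.toNat] using Nat.xor_bit true a false b
  · simpa [Nat.bit, Bool.toNat] using Nat.xor_bit true a true b

theorem pvXorPow : ∀ (k x : ℕ), x < 2 ^ k → 2 ^ k ^^^ x = 2 ^ k + x := by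
  intro k
  induction k with
  | zero => intro x hx; interval_cases x; decide
  | succ k ih =>
    intro x hx
    have hx2 : x / 2 < 2 ^ k := by omega
    have h1 : (2 : ℕ) ^ (k + 1) = 2 * 2 ^ k + 0 := by ring
    have h2 : x = 2 * (x / 2) + x % 2 := by omega
    calc 2 ^ (k+1) ^^^ x = (2 * 2^k + 0) ^^^ (2 * (x/2) + x % 2) := by rw [← h1, ← h2]
    _ = 2 * (2^k ^^^ x/2) + (0 ^^^ x % 2) := pvXorBit _ _ _ _ (by omega) (by omega)
    _ = 2 * (2^k + x/2) + x % 2 := by rw [ih _ hx2]; simp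
    _ = 2 ^ (k+1) + x := by ring_nf; omega

theorem pvXorHigh (k x z : ℕ) (hx : x < 2 ^ k) (hz : z < 2 ^ k) :
    x ^^^ (2 ^ k + z) = 2 ^ k + (x ^^^ z) := by
  rw [← pvXorPow k z hz, Nat.xor_comm x, Nat.xor_assoc, pvXorPow k (z ^^^ x) (Nat.xor_lt_two_pow hz hx), Nat.xor_comm z x]

theorem pvXorHigh2 (k x z : ℕ) (hx : x < 2 ^ k) (hz : z < 2 ^ k) :
    (2 ^ k + x) ^^^ (2 ^ k + z) = x ^^^ z := by
  rw [← pvXorPow k x hx, ← pvXorPow k z hz]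
  rw [Nat.xor_comm (2^k) x, Nat.xor_assoc, ← Nat.xor_assoc (2^k), Nat.xor_self]
  simp [Nat.xor_comm]

def pvF (m n : Nat) (l : Int) : Int :=
  ∑ x ∈ Finset.range m, ∑ y ∈ Finset.range n, max 0 (((x ^^^ y : Nat) : Int) - l)

def pvG (m n : Nat) (l : Int) : Int :=
  ∑ x ∈ Finset.range m, ∑ y ∈ Finset.range n, (if l < ((x ^^^ y : Nat) : Int) then (1 : Int) else 0)

theorem pvF_comm (m n : Nat) (l : Int) : pvF m n l = pvF n m l := by
  unfold pvF
  rw [Finset.sum_comm]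
  simp [Nat.xor_comm]

theorem pvSumMax (n : ℕ) (l : ℤ) (hl : 0 ≤ l) :
    ∑ y ∈ Finset.range n, max 0 ((y : ℤ) - l) = Tz (max 0 ((n : ℤ) - l)) := by
  induction n with
  | zero =>
    have h2 : max 0 ((0:ℤ) - l) = 0 := by omega
    rw [Finset.sum_range_zero, Nat.cast_zero, h2]
    simp [Tz]
  | succ n ih =>
    rw [Finset.sum_range_succ, ih]
    have h1 := pvTz_double (max 0 ((n : ℤ) - l))
    have h2 := pvTz_double (max 0 ((n : ℤ) + 1 - l))
    have h3 : (max 0 ((n:ℤ) + 1 - l)) * ((max 0 ((n:ℤ) + 1 - l)) - 1)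
        = (max 0 ((n:ℤ) - l)) * ((max 0 ((n:ℤ) - l)) - 1) + 2 * max 0 ((n:ℤ) - l) := by
      rcases le_or_gt l (n:ℤ) with h | h
      · have e1 : max 0 ((n:ℤ) - l) = (n:ℤ) - l := by omega
        have e2 : max 0 ((n:ℤ) + 1 - l) = (n:ℤ) + 1 - l := by omega
        rw [e1, e2]; ring
      · have e1 : max 0 ((n:ℤ) - l) = 0 := by omega
        have e2 : max 0 ((n:ℤ) + 1 - l) = 0 := by omega
        rw [e1, e2]; ring
    push_cast
    linarith [h1, h2, h3]

theorem pvSum_xor (k x : ℕ) (hx : x < 2 ^ k) (h : ℕ → ℤ) :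
    ∑ y ∈ Finset.range (2 ^ k), h (x ^^^ y) = ∑ y ∈ Finset.range (2 ^ k), h y := by
  apply Finset.sum_nbij' (i := fun y => x ^^^ y) (j := fun y => x ^^^ y) <;>
    intro a ha <;>
    simp only [Finset.mem_range] at * <;>
    simp [Nat.xor_lt_two_pow hx ha, Nat.xor_xor_cancel_left]

-- pointwise: splitting off a full 2^k block of the xor value
theorem pvPoint (b v l : ℤ) (hv : 0 ≤ v) :
    max 0 (b + v - l) = max 0 (b - l) + max 0 (v - max 0 (l - b)) := by omega

theorem pvF_split (k R N2 : ℕ) (l : ℤ) (hR : R ≤ 2 ^ k) (hN2 : N2 ≤ 2 ^ k) (hl : 0 ≤ l) :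
    pvF R (2 ^ k + N2) l
      = (R : ℤ) * Tz (max 0 ((2 ^ k : ℕ) - l)) + (R : ℤ) * (N2 : ℤ) * max 0 ((2 ^ k : ℕ) - l)
        + pvF R N2 (max 0 (l - (2 ^ k : ℕ))) := by
  unfold pvF
  have hsplit : ∀ x ∈ Finset.range R,
      ∑ y ∈ Finset.range (2 ^ k + N2), max 0 (((x ^^^ y : ℕ) : ℤ) - l)
        = (∑ y ∈ Finset.range (2 ^ k), max 0 (((x ^^^ y : ℕ) : ℤ) - l))
          + ((N2 : ℤ) * max 0 ((2 ^ k : ℕ) - l)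
             + ∑ z ∈ Finset.range N2, max 0 (((x ^^^ z : ℕ) : ℤ) - max 0 (l - (2 ^ k : ℕ)))) := by
    intro x hx
    simp only [Finset.mem_range] at hx
    rw [Finset.sum_range_add]
    congr 1
    have hxk : x < 2 ^ k := by omega
    have hpt : ∀ z ∈ Finset.range N2,
        max 0 (((x ^^^ (2 ^ k + z) : ℕ) : ℤ) - l)
          = max 0 ((2 ^ k : ℕ) - l) + max 0 (((x ^^^ z : ℕ) : ℤ) - max 0 (l - (2 ^ k : ℕ))) := by
      intro z hz
      simp only [Finset.mem_range] at hz
      rw [pvXorHigh k x z hxk (by omega)]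
      push_cast
      rw [pvPoint ((2:ℤ) ^ k) _ l (by positivity)]
    rw [Finset.sum_congr rfl hpt, Finset.sum_add_distrib, Finset.sum_const, Finset.card_range, nsmul_eq_mul]
  rw [Finset.sum_congr rfl hsplit, Finset.sum_add_distrib, Finset.sum_add_distrib]
  rw [Finset.sum_congr rfl (fun x hx => pvSum_xor k x (by simp at hx; omega) (fun y => max 0 ((y:ℤ) - l)))]
  simp only [Finset.sum_const, Finset.card_range, nsmul_eq_mul, pvSumMax _ _ hl]
  ring

theorem pvF_split_rows (k R2 N2 : ℕ) (l : ℤ) (hR2 : R2 ≤ 2 ^ k) (hN2 : N2 ≤ 2 ^ k) (hl : 0 ≤ l) :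
    pvF (2 ^ k + R2) (2 ^ k + N2) l
      = pvF (2 ^ k) (2 ^ k + N2) l
        + ((2 ^ k : ℕ) * (R2 : ℤ) * max 0 ((2 ^ k : ℕ) - l) + pvF R2 (2 ^ k) (max 0 (l - (2 ^ k : ℕ))))
        + pvF R2 N2 l := by
  unfold pvF
  rw [Finset.sum_range_add]
  have hrow : ∀ x ∈ Finset.range R2,
      ∑ y ∈ Finset.range (2 ^ k + N2), max 0 ((((2 ^ k + x) ^^^ y : ℕ) : ℤ) - l)
        = ((2 ^ k : ℕ) * max 0 ((2 ^ k : ℕ) - l)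
            + ∑ y ∈ Finset.range (2 ^ k), max 0 (((x ^^^ y : ℕ) : ℤ) - max 0 (l - (2 ^ k : ℕ))))
          + ∑ z ∈ Finset.range N2, max 0 (((x ^^^ z : ℕ) : ℤ) - l) := by
    intro x hx
    simp only [Finset.mem_range] at hx
    have hxk : x < 2 ^ k := by omega
    rw [Finset.sum_range_add]
    congr 1
    · have hpt : ∀ y ∈ Finset.range (2 ^ k),
          max 0 ((((2 ^ k + x) ^^^ y : ℕ) : ℤ) - l)
            = max 0 ((2 ^ k : ℕ) - l) + max 0 (((x ^^^ y : ℕ) : ℤ) - max 0 (l - (2 ^ k : ℕ))) := by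
        intro y hy
        simp only [Finset.mem_range] at hy
        rw [Nat.xor_comm (2 ^ k + x) y, pvXorHigh k y x hy hxk, Nat.xor_comm y x]
        push_cast
        rw [pvPoint ((2:ℤ) ^ k) _ l (by positivity)]
      rw [Finset.sum_congr rfl hpt, Finset.sum_add_distrib, Finset.sum_const, Finset.card_range, nsmul_eq_mul]
    · apply Finset.sum_congr rfl
      intro z hz
      simp only [Finset.mem_range] at hz
      rw [pvXorHigh2 k x z hxk (by omega)]
  rw [Finset.sum_congr rfl hrow]
  simp only [Finset.sum_add_distrib, Finset.sum_const, Finset.card_range, nsmul_eq_mul]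
  push_cast
  ring

-- ---- modular helpers ----

theorem pvMod_pos (a M : ℤ) (hM : 0 < M) : PySem.Int.mod a M = a % M :=
  PySem.Int.mod_eq_emod_of_pos hM

theorem pvModCongr (x y M : ℤ) (hM : M ≠ 0) (h : M ∣ x - y) :
    PySem.Int.mod x M = PySem.Int.mod y M := by
  have hx := PySem.Int.floordiv_mul_add_mod x M
  have hy := PySem.Int.floordiv_mul_add_mod y M
  have hdvd : |M| ∣ PySem.Int.mod x M - PySem.Int.mod y M := by
    rw [abs_dvd]
    obtain ⟨t, ht⟩ := h
    exact ⟨t - PySem.Int.floordiv x M + PySem.Int.floordiv y M,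
      by linear_combination ht + hx - hy⟩
  have hz : PySem.Int.mod x M - PySem.Int.mod y M = 0 := by
    refine Int.eq_zero_of_abs_lt_dvd hdvd ?_
    rcases lt_or_gt_of_ne hM with hneg | hpos
    · have b1 := PySem.Int.mod_neg_bounds x hneg
      have b2 := PySem.Int.mod_neg_bounds y hneg
      rw [abs_of_neg hneg] at *
      rcases abs_cases (PySem.Int.mod x M - PySem.Int.mod y M) with ⟨he, _⟩ | ⟨he, _⟩ <;> omega
    · have b1 := PySem.Int.mod_nonneg x hpos
      have b2 := PySem.Int.mod_nonneg y hpos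
      have b3 := PySem.Int.mod_lt x hpos
      have b4 := PySem.Int.mod_lt y hpos
      rw [abs_of_pos hpos]
      rcases abs_cases (PySem.Int.mod x M - PySem.Int.mod y M) with ⟨he, _⟩ | ⟨he, _⟩ <;> omega
  omega

theorem pvModDef (a M : ℤ) : PySem.Int.mod a M = a - PySem.Int.floordiv a M * M := by
  linarith [PySem.Int.floordiv_mul_add_mod a M]

theorem pvMod_zero_left (M : ℤ) : PySem.Int.mod 0 M = 0 := by
  simp [PySem.Int.mod]

theorem pvMulC (a b M : ℤ) (hM : M ≠ 0) :
    multiplyWithModulus a b M = PySem.Int.mod (a * b) M := by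
  unfold multiplyWithModulus
  refine pvModCongr _ _ _ hM ?_
  rw [pvModDef a M, pvModDef b M]
  exact ⟨-(PySem.Int.floordiv a M) * b - PySem.Int.floordiv b M * a
    + PySem.Int.floordiv a M * PySem.Int.floordiv b M * M, by ring⟩

theorem pvMulLC (x y M : ℤ) (hM : M ≠ 0) :
    PySem.Int.mod (PySem.Int.mod x M * y) M = PySem.Int.mod (x * y) M := by
  refine pvModCongr _ _ _ hM ?_
  rw [pvModDef x M]
  exact ⟨-(PySem.Int.floordiv x M) * y, by ring⟩

theorem pvMul3C (a b c M : ℤ) (hM : M ≠ 0) :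
    multiplyWithModulus3 a b c M = PySem.Int.mod (a * b * c) M := by
  unfold multiplyWithModulus3
  rw [pvMulC _ _ _ hM, pvMulC _ _ _ hM, pvMulLC _ _ _ hM]

theorem pvTri_spec (n M : ℤ) (hM : M ≠ 0) :
    triangleWithModulus n M = PySem.Int.mod (Tz n) M := by
  unfold triangleWithModulus
  set p := PySem.Int.mod n (M * 2) with hp
  have hq := PySem.Int.floordiv_mul_add_mod n (M * 2)
  have hsh : (p * (p - 1)) >>> (1:ℕ) = p * (p - 1) / 2 := by
    rw [Int.shiftRight_eq_div_pow]; norm_num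
  rw [hsh]
  refine pvModCongr _ _ _ hM ?_
  have h1 : 2 * (p * (p - 1) / 2) = p * (p - 1) := by
    have he : Even (p * (p - 1)) := by
      rw [mul_comm]; simpa using Int.even_mul_succ_self (p - 1)
    obtain ⟨c, hc⟩ := he; omega
  have h2 := pvTz_double n
  set fd := PySem.Int.floordiv n (M * 2) with hfd
  have key : p * (p - 1) - n * (n - 1) = 2 * (M * (fd * (M * 2 * fd - 2 * n + 1))) := by
    have hp2 : p = n - M * 2 * fd := by linarith [hq]
    rw [hp2]; ring
  refine ⟨fd * (M * 2 * fd - 2 * n + 1), ?_⟩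
  omega

theorem pvAdd3ModC (a b c M : ℤ) (hM : M ≠ 0) :
    PySem.Int.mod (PySem.Int.mod a M + (PySem.Int.mod b M + PySem.Int.mod c M)) M
      = PySem.Int.mod (a + (b + c)) M := by
  refine pvModCongr _ _ _ hM ?_
  rw [pvModDef a M, pvModDef b M, pvModDef c M]
  exact ⟨-(PySem.Int.floordiv a M) - PySem.Int.floordiv b M - PySem.Int.floordiv c M, by ring⟩

theorem pvAdd4ModC (a b c d e g M : ℤ) (hM : M ≠ 0) :
    PySem.Int.mod (PySem.Int.mod a M + (PySem.Int.mod b M + PySem.Int.mod c M)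
        + (PySem.Int.mod d M + PySem.Int.mod e M) + PySem.Int.mod g M) M
      = PySem.Int.mod (a + (b + c) + (d + e) + g) M := by
  refine pvModCongr _ _ _ hM ?_
  rw [pvModDef a M, pvModDef b M, pvModDef c M, pvModDef d M, pvModDef e M, pvModDef g M]
  exact ⟨-(PySem.Int.floordiv a M) - PySem.Int.floordiv b M - PySem.Int.floordiv c M
    - PySem.Int.floordiv d M - PySem.Int.floordiv e M - PySem.Int.floordiv g M, by ring⟩

-- ---- roundDownToPowerOfTwo ----

theorem pvRdpLoop_spec : ∀ (f j : ℕ) (n : Int), 1 ≤ n → n < (2:ℤ)^j * 2^f → (2:ℤ)^j ≤ 2*n →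
    ∃ k : ℕ, pvRdpLoop f n ((2:ℤ)^j) = 2^k ∧ (2:ℤ)^k ≤ n ∧ n < 2^(k+1) := by
  intro f
  induction f with
  | zero =>
    intro j n h1 hf hinv
    have hj : j ≠ 0 := by
      rintro rfl; simp at hf; omega
    refine ⟨j - 1, ?_, ?_, ?_⟩
    · show pvRdpLoop 0 n (2^j) = _
      unfold pvRdpLoop
      have : (2:ℤ)^j = 2^(j-1) * 2 := by
        rw [← pow_succ]; congr 1; omega
      rw [this, Int.mul_ediv_cancel _ (by norm_num)]
    · have : (2:ℤ)^j = 2^(j-1) * 2 := by rw [← pow_succ]; congr 1; omega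
      omega
    · have : (2:ℤ)^(j-1+1) = 2^j := by congr 1; omega
      simp at hf; omega
  | succ f ih =>
    intro j n h1 hf hinv
    unfold pvRdpLoop
    split_ifs with h
    · have h2 : (2:ℤ)^j * 2 = 2^(j+1) := by rw [← pow_succ]
      rw [h2]
      refine ih (j+1) n h1 ?_ (by omega)
      have e : (2:ℤ)^(j+1) * 2^f = 2^j * 2^(f+1) := by ring
      omega
    · have hj : j ≠ 0 := by rintro rfl; simp at h; omega
      refine ⟨j - 1, ?_, ?_, ?_⟩
      · have : (2:ℤ)^j = 2^(j-1) * 2 := by rw [← pow_succ]; congr 1; omega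
        rw [this, Int.mul_ediv_cancel _ (by norm_num)]
      · have : (2:ℤ)^j = 2^(j-1) * 2 := by rw [← pow_succ]; congr 1; omega
        omega
      · have : (2:ℤ)^(j-1+1) = 2^j := by congr 1; omega
        omega

theorem pvRdp_spec (n : Int) (h1 : 1 ≤ n) :
    ∃ k : ℕ, roundDownToPowerOfTwo n = 2^k ∧ (2:ℤ)^k ≤ n ∧ n < 2^(k+1) := by
  unfold roundDownToPowerOfTwo
  have hf : n < (2:ℤ)^0 * 2^(n.natAbs + 2) := by
    have h2 : (n.natAbs : ℤ) < 2^(n.natAbs) := by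
      exact_mod_cast Nat.lt_two_pow_self
    have h3 : (2:ℤ)^(n.natAbs) ≤ 2^(n.natAbs + 2) := by
      apply pow_le_pow_right₀ <;> omega
    rw [Int.natAbs_of_nonneg (by omega)] at h2
    omega
  have := pvRdpLoop_spec (n.natAbs + 2) 0 n h1 hf (by norm_num; omega)
  simpa using this

theorem pvF_one (n : ℕ) (l : ℤ) (hl : 0 ≤ l) : pvF 1 n l = Tz (max 0 ((n:ℤ) - l)) := by
  unfold pvF
  rw [Finset.sum_range_one]
  simp only [Nat.zero_xor]
  exact pvSumMax n l hl

theorem pvA_correct (f : Nat) (M : Int) (hM : M ≠ 0) : ∀ (r c w : Int),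
    0 ≤ r → 0 ≤ c → 0 ≤ w →
    2 * (r.toNat + c.toNat) + (if r > c then 1 else 0) < f →
    pvElderFuel f r c w M = PySem.Int.mod (pvF r.toNat c.toNat w) M := by
  induction f with
  | zero => intro r c w _ _ _ hf; omega
  | succ f ih =>
    intro r c w hr hc hw hf
    simp only [pvElderFuel]
    by_cases h1 : r > c
    · rw [if_pos h1, ih c r w hc hr hw (by split_ifs at hf ⊢ <;> omega), pvF_comm]
    · rw [if_neg h1]
      by_cases h2 : r = 1
      · rw [if_pos h2, pvTri_spec _ _ hM, h2]
        have h11 : (1:ℤ).toNat = 1 := rfl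
        rw [h11, pvF_one c.toNat w hw, Int.toNat_of_nonneg hc]
      · rw [if_neg h2]
        by_cases h3 : r = 0
        · rw [if_pos h3, h3]
          show (0:ℤ) = _
          have h00 : (0:ℤ).toNat = 0 := rfl
          rw [h00]
          unfold pvF
          rw [Finset.sum_range_zero, pvMod_zero_left]
        · rw [if_neg h3]
          have hr2 : 2 ≤ r := by omega
          have hc2 : 2 ≤ c := by omega
          obtain ⟨k, hbk, hb1, hb2⟩ := pvRdp_spec c (by omega)
          rw [hbk]
          have hKz : (((2:ℕ)^k : ℕ) : ℤ) = (2:ℤ)^k := by push_cast; ring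
          have hKpos : (0:ℤ) < 2^k := by positivity
          have h2k1 : (2:ℤ)^(k+1) = 2 * 2^k := by ring
          have hck : (c - 2^k).toNat = c.toNat - 2^k ∧ (2:ℕ)^k ≤ c.toNat
              ∧ c.toNat - 2^k ≤ 2^k := by omega
          have h1le : (1:ℕ) ≤ 2^k := Nat.one_le_two_pow
          by_cases h4 : r ≤ 2^k
          · rw [if_pos h4, pvMulC _ _ _ hM, pvMul3C _ _ _ _ hM, pvTri_spec _ _ hM,
              ih r (c - 2^k) (max 0 (w - 2^k)) hr (by omega) (by omega)
                (by split_ifs at hf ⊢ <;> omega),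
              pvMulLC _ _ _ hM, pvAdd3ModC _ _ _ _ hM]
            congr 1
            have hcsplit : c.toNat = 2^k + (c.toNat - 2^k) := by omega
            rw [hcsplit, pvF_split k r.toNat (c.toNat - 2^k) w (by omega) (by omega) hw]
            rw [hck.1, Nat.cast_sub hck.2.1, Int.toNat_of_nonneg hr, Int.toNat_of_nonneg hc, hKz]
            ring
          · rw [if_neg h4]
            have h2kt : ((2:ℤ)^k).toNat = 2^k := by
              rw [← hKz, Int.toNat_natCast]
            have hrk : (r - 2^k).toNat = r.toNat - 2^k ∧ (2:ℕ)^k ≤ r.toNat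
                ∧ r.toNat - 2^k ≤ 2^k := by omega
            rw [pvMulC _ _ _ hM, pvMul3C _ _ _ _ hM, pvMul3C _ _ _ _ hM,
              pvTri_spec _ _ hM,
              ih (2^k) (c - 2^k) (max 0 (w - 2^k)) (by positivity) (by omega) (by omega)
                (by split_ifs <;> omega),
              ih (r - 2^k) (2^k) (max 0 (w - 2^k)) (by omega) (by positivity) (by omega)
                (by split_ifs <;> omega),
              ih (r - 2^k) (c - 2^k) w (by omega) (by omega) hw
                (by split_ifs <;> omega),
              pvMulLC _ _ _ hM, pvAdd4ModC _ _ _ _ _ _ _ hM]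
            congr 1
            have hcsplit : c.toNat = 2^k + (c.toNat - 2^k) := by omega
            have hrsplit : r.toNat = 2^k + (r.toNat - 2^k) := by omega
            rw [hcsplit, hrsplit,
              pvF_split_rows k (r.toNat - 2^k) (c.toNat - 2^k) w (by omega) (by omega) hw,
              pvF_split k (2^k) (c.toNat - 2^k) w (le_refl _) (by omega) hw]
            rw [hck.1, hrk.1, h2kt, Nat.cast_sub hck.2.1, Nat.cast_sub hrk.2.1,
              Int.toNat_of_nonneg hr, Int.toNat_of_nonneg hc, hKz]
            ring

-- ---- B-side: low-bit parity recurrence ----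

theorem pvParity (h : ℕ → ℤ) : ∀ (A : ℕ), ∑ x ∈ Finset.range A, h x
    = (∑ u ∈ Finset.range (A - A/2), h (2*u)) + ∑ u ∈ Finset.range (A/2), h (2*u+1) := by
  intro A
  induction A with
  | zero => simp
  | succ A ih =>
    rw [Finset.sum_range_succ, ih]
    rcases Nat.even_or_odd A with ⟨q, hq⟩ | ⟨q, hq⟩
    · have e1 : (A+1) - (A+1)/2 = (A - A/2) + 1 := by omega
      have e2 : (A+1)/2 = A/2 := by omega
      rw [e1, e2, Finset.sum_range_succ]
      have e3 : 2 * (A - A/2) = A := by omega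
      rw [e3]
      ring
    · have e1 : (A+1) - (A+1)/2 = A - A/2 := by omega
      have e2 : (A+1)/2 = A/2 + 1 := by omega
      rw [e1, e2, Finset.sum_range_succ]
      have e3 : 2 * (A/2) + 1 = A := by omega
      rw [e3]
      ring

theorem pvSplit4 (φ : ℕ → ℤ) (a b : ℕ) :
    ∑ x ∈ Finset.range a, ∑ y ∈ Finset.range b, φ (x ^^^ y)
      = ((∑ u ∈ Finset.range (a - a/2), ∑ v ∈ Finset.range (b - b/2), φ (2*(u ^^^ v)))
        + ∑ u ∈ Finset.range (a - a/2), ∑ v ∈ Finset.range (b/2), φ (2*(u ^^^ v) + 1))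
      + ((∑ u ∈ Finset.range (a/2), ∑ v ∈ Finset.range (b - b/2), φ (2*(u ^^^ v) + 1))
        + ∑ u ∈ Finset.range (a/2), ∑ v ∈ Finset.range (b/2), φ (2*(u ^^^ v))) := by
  rw [pvParity (fun x => ∑ y ∈ Finset.range b, φ (x ^^^ y)) a]
  have hx : ∀ (x : ℕ), ∑ y ∈ Finset.range b, φ (x ^^^ y)
      = (∑ v ∈ Finset.range (b - b/2), φ (x ^^^ (2*v))) + ∑ v ∈ Finset.range (b/2), φ (x ^^^ (2*v+1)) :=
    fun x => pvParity (fun y => φ (x ^^^ y)) b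
  simp only [hx]
  rw [Finset.sum_add_distrib, Finset.sum_add_distrib]
  have q1 : ∀ u v : ℕ, (2*u) ^^^ (2*v) = 2*(u^^^v) := fun u v => by
    simpa using pvXorBit u v 0 0 (by omega) (by omega)
  have q2 : ∀ u v : ℕ, (2*u) ^^^ (2*v+1) = 2*(u^^^v)+1 := fun u v => by
    simpa using pvXorBit u v 0 1 (by omega) (by omega)
  have q3 : ∀ u v : ℕ, (2*u+1) ^^^ (2*v) = 2*(u^^^v)+1 := fun u v => by
    simpa using pvXorBit u v 1 0 (by omega) (by omega)
  have q4 : ∀ u v : ℕ, (2*u+1) ^^^ (2*v+1) = 2*(u^^^v) := fun u v => by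
    simpa using pvXorBit u v 1 1 (by omega) (by omega)
  simp only [q1, q2, q3, q4]

theorem pvPtG (w : ℕ) (c t : ℤ) (ht : t = 0 ∨ t = 1) :
    (if c < 2*(w:ℤ) + t then (1:ℤ) else 0) = (if (c-t)/2 < (w:ℤ) then 1 else 0) := by
  rcases ht with rfl | rfl <;> split_ifs <;> first | rfl | omega

theorem pvPtF (w : ℕ) (c t : ℤ) (ht : t = 0 ∨ t = 1) :
    max 0 ((2*(w:ℤ) + t) - c)
      = 2 * max 0 ((w:ℤ) - (c - t)/2) - ((c - t) - 2*((c-t)/2)) * (if (c-t)/2 < (w:ℤ) then 1 else 0) := by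
  rcases ht with rfl | rfl <;> split_ifs <;> omega

theorem pvRecG (a b : ℕ) (c : ℤ) :
    pvG a b c = (pvG (a - a/2) (b - b/2) (c/2) + pvG (a - a/2) (b/2) ((c-1)/2))
      + (pvG (a/2) (b - b/2) ((c-1)/2) + pvG (a/2) (b/2) (c/2)) := by
  unfold pvG
  rw [pvSplit4 (fun v => if c < (v:ℤ) then (1:ℤ) else 0) a b]
  congr 1 <;> congr 1 <;>
    refine Finset.sum_congr rfl fun u _ => Finset.sum_congr rfl fun v _ => ?_ <;>
    push_cast <;>
    first
      | simpa using pvPtG (u ^^^ v) c 0 (Or.inl rfl)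
      | simpa using pvPtG (u ^^^ v) c 1 (Or.inr rfl)

theorem pvRecF (a b : ℕ) (c : ℤ) :
    pvF a b c
      = ((2 * pvF (a - a/2) (b - b/2) (c/2) - (c - 2*(c/2)) * pvG (a - a/2) (b - b/2) (c/2))
        + (2 * pvF (a - a/2) (b/2) ((c-1)/2) - ((c-1) - 2*((c-1)/2)) * pvG (a - a/2) (b/2) ((c-1)/2)))
      + ((2 * pvF (a/2) (b - b/2) ((c-1)/2) - ((c-1) - 2*((c-1)/2)) * pvG (a/2) (b - b/2) ((c-1)/2))
        + (2 * pvF (a/2) (b/2) (c/2) - (c - 2*(c/2)) * pvG (a/2) (b/2) (c/2))) := by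
  unfold pvF pvG
  rw [pvSplit4 (fun v => max 0 ((v:ℤ) - c)) a b]
  congr 1 <;> congr 1 <;>
    rw [Finset.mul_sum, Finset.mul_sum, ← Finset.sum_sub_distrib] <;>
    refine Finset.sum_congr rfl fun u _ => ?_ <;>
    rw [Finset.mul_sum, Finset.mul_sum, ← Finset.sum_sub_distrib] <;>
    refine Finset.sum_congr rfl fun v _ => ?_ <;>
    push_cast <;>
    first
      | simpa using pvPtF (u ^^^ v) c 0 (Or.inl rfl)
      | simpa using pvPtF (u ^^^ v) c 1 (Or.inr rfl)

-- ---- B-side: table specification ----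

def pvE (m n l : Int) (d : ℕ) (da db dc : Int) : Int × Int :=
  (pvG ((m >>> d) + da).toNat ((n >>> d) + db).toNat (((l >>> d) - 1) + dc),
   pvF ((m >>> d) + da).toNat ((n >>> d) + db).toNat (((l >>> d) - 1) + dc))

def pvTabSpec (m n l : Int) (d : ℕ) : List (Int × Int) :=
  [pvE m n l d 0 0 0, pvE m n l d 0 0 1, pvE m n l d 0 1 0, pvE m n l d 0 1 1,
   pvE m n l d 1 0 0, pvE m n l d 1 0 1, pvE m n l d 1 1 0, pvE m n l d 1 1 1]

theorem pvLook (m n l : Int) (d : ℕ) (e1 e2 e3 : ℤ)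
    (h1 : e1 = 0 ∨ e1 = 1) (h2 : e2 = 0 ∨ e2 = 1) (h3 : e3 = 0 ∨ e3 = 1) :
    PySem.List.pyGetD (pvTabSpec m n l d) (e1*4 + e2*2 + e3) (0, 0) = pvE m n l d e1 e2 e3 := by
  rcases h1 with rfl | rfl <;> rcases h2 with rfl | rfl <;> rcases h3 with rfl | rfl <;>
    norm_num <;> rfl

theorem pvShr1 (x : ℤ) : x >>> (1:ℕ) = x / 2 := by
  rw [Int.shiftRight_eq_div_pow]; norm_num

theorem pvShrCast (m : Int) (h : 0 ≤ m) (d : ℕ) : m >>> d = ((m.toNat >>> d : ℕ) : ℤ) := by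
  rw [Int.natCast_shiftRight, Int.toNat_of_nonneg h]

theorem pvShrNonneg (m : Int) (h : 0 ≤ m) (d : ℕ) : 0 ≤ m >>> d := by
  rw [pvShrCast m h d]; positivity

theorem pvShrStep (x : ℤ) (hx : 0 ≤ x) (d : ℕ) : x >>> (d+1) = (x >>> d) / 2 := by
  rw [pvShrCast x hx (d+1), pvShrCast x hx d, Nat.shiftRight_succ]
  push_cast [Nat.shiftRight_eq_div_pow]
  rfl

theorem pvRecGI (a b : ℤ) (ha : 0 ≤ a) (hb : 0 ≤ b) (c : ℤ) :
    pvG a.toNat b.toNat c = (pvG (a - a/2).toNat (b - b/2).toNat (c/2) + pvG (a - a/2).toNat (b/2).toNat ((c-1)/2))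
      + (pvG (a/2).toNat (b - b/2).toNat ((c-1)/2) + pvG (a/2).toNat (b/2).toNat (c/2)) := by
  have e1 : (a - a/2).toNat = a.toNat - a.toNat/2 := by omega
  have e2 : (a/2).toNat = a.toNat/2 := by omega
  have e3 : (b - b/2).toNat = b.toNat - b.toNat/2 := by omega
  have e4 : (b/2).toNat = b.toNat/2 := by omega
  rw [e1, e2, e3, e4]
  exact pvRecG a.toNat b.toNat c

theorem pvRecFI (a b : ℤ) (ha : 0 ≤ a) (hb : 0 ≤ b) (c : ℤ) :
    pvF a.toNat b.toNat c
      = ((2 * pvF (a - a/2).toNat (b - b/2).toNat (c/2) - (c - 2*(c/2)) * pvG (a - a/2).toNat (b - b/2).toNat (c/2))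
        + (2 * pvF (a - a/2).toNat (b/2).toNat ((c-1)/2) - ((c-1) - 2*((c-1)/2)) * pvG (a - a/2).toNat (b/2).toNat ((c-1)/2)))
      + ((2 * pvF (a/2).toNat (b - b/2).toNat ((c-1)/2) - ((c-1) - 2*((c-1)/2)) * pvG (a/2).toNat (b - b/2).toNat ((c-1)/2))
        + (2 * pvF (a/2).toNat (b/2).toNat (c/2) - (c - 2*(c/2)) * pvG (a/2).toNat (b/2).toNat (c/2))) := by
  have e1 : (a - a/2).toNat = a.toNat - a.toNat/2 := by omega
  have e2 : (a/2).toNat = a.toNat/2 := by omega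
  have e3 : (b - b/2).toNat = b.toNat - b.toNat/2 := by omega
  have e4 : (b/2).toNat = b.toNat/2 := by omega
  rw [e1, e2, e3, e4]
  exact pvRecF a.toNat b.toNat c

set_option maxHeartbeats 3200000 in
theorem pvEntry_step (m n l : Int) (hm : 0 ≤ m) (hn : 0 ≤ n) (hl : 0 ≤ l)
    (d : ℕ) (dI : Int) (hdI : dI.toNat = d)
    (da db dc : Int) (hda : da = 0 ∨ da = 1) (hdb : db = 0 ∨ db = 1) (hdc : dc = 0 ∨ dc = 1) :
    pvStepEntry m n l dI (pvTabSpec m n l (d + 1)) (da*4 + db*2 + dc)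
      = pvE m n l d da db dc := by
  have hmd : 0 ≤ m >>> d := pvShrNonneg m hm d
  have hnd : 0 ≤ n >>> d := pvShrNonneg n hn d
  have hld : 0 ≤ l >>> d := pvShrNonneg l hl d
  have hmb : m >>> (d+1) = (m >>> d) / 2 := pvShrStep m hm d
  have hnb : n >>> (d+1) = (n >>> d) / 2 := pvShrStep n hn d
  have hlb : l >>> (d+1) = (l >>> d) / 2 := pvShrStep l hl d
  have hdt : dI.toNat = d := hdI
  rcases hda with rfl | rfl <;> rcases hdb with rfl | rfl <;> rcases hdc with rfl | rfl <;>
  · have hk2 : ∀ k : ℤ, k >>> (2:ℕ) = k / 4 := fun k => by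
      rw [Int.shiftRight_eq_div_pow]; norm_num
    have hb1 : ∀ k : ℤ, PySem.Int.band k 1 = k % 2 := fun k => by
      rw [PySem.Int.band_one, pvMod_pos _ _ (by norm_num)]
    simp only [pvStepEntry, hdt, hk2, hb1, pvShr1,
      show PySem.List.pyRange 0 2 1 = [0, 1] from by decide, List.foldl,
      show PySem.Int.bxor 0 0 = 0 from by decide, show PySem.Int.bxor 0 1 = 1 from by decide,
      show PySem.Int.bxor 1 0 = 1 from by decide, show PySem.Int.bxor 1 1 = 0 from by decide]
    norm_num
    rw [pvLook m n l (d+1) _ _ _ (by omega) (by omega) (by omega),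
      pvLook m n l (d+1) _ _ _ (by omega) (by omega) (by omega),
      pvLook m n l (d+1) _ _ _ (by omega) (by omega) (by omega),
      pvLook m n l (d+1) _ _ _ (by omega) (by omega) (by omega)]
    unfold pvE
    simp only [hmb, hnb, hlb]
    simp only [show ∀ x : ℤ, (m >>> d) / 2 + (x - (m >>> d) / 2) = x from fun x => by ring,
      show ∀ x : ℤ, (n >>> d) / 2 + (x - (n >>> d) / 2) = x from fun x => by ring,
      show ∀ x : ℤ, (l >>> d) / 2 - 1 + (x - (l >>> d) / 2 + 1) = x from fun x => by ring]
    rw [Prod.mk.injEq]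
    constructor
    · refine Eq.trans ?_ (pvRecGI _ _ (by omega) (by omega) _).symm
      ring_nf
    · refine Eq.trans ?_ (pvRecFI _ _ (by omega) (by omega) _).symm
      ring_nf

theorem pvStepTab (m n l : Int) (hm : 0 ≤ m) (hn : 0 ≤ n) (hl : 0 ≤ l)
    (d : ℕ) (dI : Int) (hdI : dI.toNat = d) :
    (PySem.List.pyRange 0 8 1).map (pvStepEntry m n l dI (pvTabSpec m n l (d+1)))
      = pvTabSpec m n l d := by
  have h8 : PySem.List.pyRange 0 8 1 = [0,1,2,3,4,5,6,7] := by decide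
  rw [h8]
  simp only [List.map]
  have e : ∀ (da db dc : Int), da = 0 ∨ da = 1 → db = 0 ∨ db = 1 → dc = 0 ∨ dc = 1 →
      pvStepEntry m n l dI (pvTabSpec m n l (d+1)) (da*4+db*2+dc) = pvE m n l d da db dc :=
    fun da db dc => pvEntry_step m n l hm hn hl d dI hdI da db dc
  have h0 := e 0 0 0 (Or.inl rfl) (Or.inl rfl) (Or.inl rfl)
  have h1 := e 0 0 1 (Or.inl rfl) (Or.inl rfl) (Or.inr rfl)
  have h2 := e 0 1 0 (Or.inl rfl) (Or.inr rfl) (Or.inl rfl)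
  have h3 := e 0 1 1 (Or.inl rfl) (Or.inr rfl) (Or.inr rfl)
  have h4 := e 1 0 0 (Or.inr rfl) (Or.inl rfl) (Or.inl rfl)
  have h5 := e 1 0 1 (Or.inr rfl) (Or.inl rfl) (Or.inr rfl)
  have h6 := e 1 1 0 (Or.inr rfl) (Or.inr rfl) (Or.inl rfl)
  have h7 := e 1 1 1 (Or.inr rfl) (Or.inr rfl) (Or.inr rfl)
  norm_num at h0 h1 h2 h3 h4 h5 h6 h7
  rw [h0, h1, h2, h3, h4, h5, h6, h7]
  rfl

theorem pvBaseTab (m n l : Int) (hm : 0 ≤ m) (hn : 0 ≤ n) (hl : 0 ≤ l) (D : Int) (hD : 0 ≤ D)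
    (hm0 : m >>> D.toNat = 0) (hn0 : n >>> D.toNat = 0) (hl0 : l >>> D.toNat = 0) :
    (PySem.List.pyRange 0 8 1).map (pvBaseEntry m n l D) = pvTabSpec m n l D.toNat := by
  have h8 : PySem.List.pyRange 0 8 1 = [0,1,2,3,4,5,6,7] := by decide
  rw [h8]
  simp only [List.map]
  have hk2 : ∀ k : ℤ, k >>> (2:ℕ) = k / 4 := fun k => by
    rw [Int.shiftRight_eq_div_pow]; norm_num
  have hb1 : ∀ k : ℤ, PySem.Int.band k 1 = k % 2 := fun k => by
    rw [PySem.Int.band_one, pvMod_pos _ _ (by norm_num)]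
  have e : ∀ (da db dc : Int), da = 0 ∨ da = 1 → db = 0 ∨ db = 1 → dc = 0 ∨ dc = 1 →
      pvBaseEntry m n l D (da*4+db*2+dc) = pvE m n l D.toNat da db dc := by
    intro da db dc hda hdb hdc
    rcases hda with rfl | rfl <;> rcases hdb with rfl | rfl <;> rcases hdc with rfl | rfl <;>
      norm_num [pvBaseEntry, pvE, pvG, pvF, hk2, hb1, pvShr1, hm0, hn0, hl0,
        Finset.sum_range_one] <;> decide
  have h0 := e 0 0 0 (Or.inl rfl) (Or.inl rfl) (Or.inl rfl)
  have h1 := e 0 0 1 (Or.inl rfl) (Or.inl rfl) (Or.inr rfl)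
  have h2 := e 0 1 0 (Or.inl rfl) (Or.inr rfl) (Or.inl rfl)
  have h3 := e 0 1 1 (Or.inl rfl) (Or.inr rfl) (Or.inr rfl)
  have h4 := e 1 0 0 (Or.inr rfl) (Or.inl rfl) (Or.inl rfl)
  have h5 := e 1 0 1 (Or.inr rfl) (Or.inl rfl) (Or.inr rfl)
  have h6 := e 1 1 0 (Or.inr rfl) (Or.inr rfl) (Or.inl rfl)
  have h7 := e 1 1 1 (Or.inr rfl) (Or.inr rfl) (Or.inr rfl)
  norm_num at h0 h1 h2 h3 h4 h5 h6 h7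
  rw [h0, h1, h2, h3, h4, h5, h6, h7]
  rfl

theorem pvLoopB_spec (m n l : Int) (hm : 0 ≤ m) (hn : 0 ≤ n) (hl : 0 ≤ l) :
    ∀ (d : ℕ) (dI : Int), 0 ≤ dI → dI.toNat = d →
      pvLoopB m n l (pvTabSpec m n l d) dI = pvTabSpec m n l 0 := by
  intro d
  induction d with
  | zero =>
    intro dI h0 ht
    have hz : dI = 0 := by omega
    rw [pvLoopB, dif_neg (by omega)]
  | succ d ih =>
    intro dI h0 ht
    rw [pvLoopB, dif_pos (by omega : dI > 0)]
    have h1 : (dI - 1).toNat = d := by omega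
    show pvLoopB m n l ((PySem.List.pyRange 0 8 1).map (pvStepEntry m n l (dI-1) (pvTabSpec m n l (d+1)))) (dI - 1) = pvTabSpec m n l 0
    rw [pvStepTab m n l hm hn hl d (dI-1) h1]
    exact ih (dI-1) (by omega) h1

theorem pvDepthLoop_spec : ∀ (f : ℕ) (m n l : Int), 0 ≤ m → 0 ≤ n → 0 ≤ l → ∀ (D0 : Int), 0 ≤ D0 →
    m.toNat < 2^(D0.toNat + f) → n.toNat < 2^(D0.toNat + f) → l.toNat < 2^(D0.toNat + f) →
    ∃ D : Int, pvDepthLoop f m n l D0 = D ∧ 0 ≤ D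
      ∧ m >>> D.toNat = 0 ∧ n >>> D.toNat = 0 ∧ l >>> D.toNat = 0 := by
  intro f
  induction f with
  | zero =>
    intro m n l hm hn hl D0 hD0 bm bn bl
    refine ⟨D0, rfl, hD0, ?_, ?_, ?_⟩
    · rw [pvShrCast _ hm, Nat.shiftRight_eq_div_pow]
      have h : m.toNat / 2^D0.toNat = 0 := Nat.div_eq_of_lt (by simpa using bm)
      simp [h]
    · rw [pvShrCast _ hn, Nat.shiftRight_eq_div_pow]
      have h : n.toNat / 2^D0.toNat = 0 := Nat.div_eq_of_lt (by simpa using bn)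
      simp [h]
    · rw [pvShrCast _ hl, Nat.shiftRight_eq_div_pow]
      have h : l.toNat / 2^D0.toNat = 0 := Nat.div_eq_of_lt (by simpa using bl)
      simp [h]
  | succ f ih =>
    intro m n l hm hn hl D0 hD0 bm bn bl
    rw [pvDepthLoop]
    split_ifs with h
    · have e : (D0+1).toNat + f = D0.toNat + (f+1) := by omega
      exact ih m n l hm hn hl (D0+1) (by omega) (by rw [e]; exact bm) (by rw [e]; exact bn)
        (by rw [e]; exact bl)
    · simp only [not_or] at h
      have h1 := pvShrNonneg m hm D0.toNat
      have h2 := pvShrNonneg n hn D0.toNat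
      have h3 := pvShrNonneg l hl D0.toNat
      exact ⟨D0, rfl, hD0, by omega, by omega, by omega⟩

theorem pvB_correct (m n l M : Int)
    (hm : 0 ≤ m) (hn : 0 ≤ n) (hl : 0 ≤ l)
    (hm' : m ≤ 2147483648) (hn' : n ≤ 2147483648) (hl' : l ≤ 2147483648) :
    elder_age_alt m n l M = PySem.Int.mod (pvF m.toNat n.toNat l) M := by
  obtain ⟨D, hD, hD0, hm0, hn0, hl0⟩ := pvDepthLoop_spec 40 m n l hm hn hl 0 le_rfl
    (by norm_num; omega) (by norm_num; omega) (by norm_num; omega)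
  simp only [elder_age_alt]
  rw [hD, pvBaseTab m n l hm hn hl D hD0 hm0 hn0 hl0,
    pvLoopB_spec m n l hm hn hl D.toNat D hD0 rfl]
  have hone : PySem.List.pyGetD (pvTabSpec m n l 0) 1 (0, 0) = pvE m n l 0 0 0 1 := by
    simpa using pvLook m n l 0 0 0 1 (Or.inl rfl) (Or.inl rfl) (Or.inr rfl)
  rw [hone]
  have hs0 : ∀ x : ℤ, x >>> (0:ℕ) = x := fun x => by
    rw [Int.shiftRight_eq_div_pow]; norm_num
  unfold pvE
  simp only [hs0, add_zero, sub_add_cancel]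

-- ===== VERDICT (by name: the statement is the Claim_ definition above) =====
theorem elder_age_spec : Claim_equal_elder_age := by
  intro r c w M hdom hpre
  obtain ⟨hr, hc, hw, hM⟩ := hpre
  have hdom' : r ≤ 2147483648 ∧ c ≤ 2147483648 ∧ w ≤ 2147483648 := by
    unfold Dom_elder_age pvDomInt at hdom
    simp only [Bool.and_eq_true, decide_eq_true_eq] at hdom
    exact ⟨hdom.1.1.1.2, hdom.1.1.2.2, hdom.1.2.2⟩
  unfold Spec_elder_age elder_age
  rw [pvA_correct (2 * (r.natAbs + c.natAbs) + 2) M hM r c w hr hc hw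
      (by split_ifs <;> omega),
    pvB_correct r c w M hr hc hw hdom'.1 hdom'.2.1 hdom'.2.2]
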